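-- pv_equiv track=rewrite | github.com/robl-25/advent_of_code_2023 | day_17/part_1.py | min_loss
-- ===== SOURCE A (Python) =====
-- from heapq import heappush, heappop
--
-- def is_inside(coords, matrix):
--     row, col = coords
--
--     row_range = range(len(matrix))
--     col_range = range(len(matrix[0]))
--
--     return row in row_range and col in col_range
--
-- def add_on_queue(matrix, next_steps, heat_loss, current_coords, direction, steps = 1):
--     new_row = current_coords[0] + direction[0]
--     new_col = current_coords[1] + direction[1]
--
--     new_coords = (new_row, new_col)
--
--     if not is_inside(new_coords, matrix):
--         return
--
--     heappush(
--         next_steps,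
--         (heat_loss + matrix[new_row][new_col], new_coords, direction, steps)
--     )
--
-- def all_possibles_directions():
--     return [(1, 0), (0, 1), (-1, 0), (0, -1)]
--
-- def min_loss(matrix):
--     visited = set()
--     next_steps = [(0, (0,0), (0,0), 0)]
--     target_coords = (len(matrix) - 1, len(matrix[0]) - 1)
--
--     while next_steps:
--         heat_loss, current_coords, direction, steps = heappop(next_steps)
--
--         if current_coords == target_coords:
--             break
--
--         if (current_coords, direction, steps) in visited:
--             continue
--
--         visited.add((current_coords, direction, steps))
--
--         if direction != (0, 0) and steps < 3:
--             add_on_queue(matrix, next_steps, heat_loss, current_coords, direction, steps + 1)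
--
--         for new_direction in all_possibles_directions():
--             if new_direction != direction and new_direction != (-direction[0], -direction[1]):
--                 add_on_queue(matrix, next_steps, heat_loss, current_coords, new_direction)
--
--     return heat_loss
-- ===== SOURCE B (Python) =====
-- def min_loss(matrix):
--     rows, cols = len(matrix), len(matrix[0])
--     target = (rows - 1, cols - 1)
--     pending = [(0, (0, 0), (0, 0), 0)]
--     seen = set()
--     heat = 0
--     while pending:
--         item = min(pending)
--         pending.remove(item)
--         heat, coords, direction, steps = item
--         if coords == target:
--             return heat
--         if (coords, direction, steps) in seen:
--             continue
--         seen.add((coords, direction, steps))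
--         moves = [(d, 1) for d in ((1, 0), (0, 1), (-1, 0), (0, -1))
--                  if d != direction and d != (-direction[0], -direction[1])]
--         if direction != (0, 0) and steps < 3:
--             moves.append((direction, steps + 1))
--         for d, s in moves:
--             r, c = coords[0] + d[0], coords[1] + d[1]
--             if 0 <= r < rows and 0 <= c < cols:
--                 pending.append((heat + matrix[r][c], (r, c), d, s))
--     return heat
-- ===== Notes on version B (the rewrite author's own statement) =====
-- stated objective: alternative
-- what changed: B drops heapq and A's helper functions: it keeps an unsorted worklist and scans it for its minimum tuple each round (selection instead of a binary heap), and builds the legal successor moves as one comprehension list instead of a special-cased straight push plus a direction loop.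
-- outside the precondition, e.g. on min_loss([[1, 2], [1]]): A raises IndexError, B raises IndexError; on min_loss([[1, 1, 100], [1, 100], [1, 1, 1]]): A returns 4, B returns 4
import Mathlib
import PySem

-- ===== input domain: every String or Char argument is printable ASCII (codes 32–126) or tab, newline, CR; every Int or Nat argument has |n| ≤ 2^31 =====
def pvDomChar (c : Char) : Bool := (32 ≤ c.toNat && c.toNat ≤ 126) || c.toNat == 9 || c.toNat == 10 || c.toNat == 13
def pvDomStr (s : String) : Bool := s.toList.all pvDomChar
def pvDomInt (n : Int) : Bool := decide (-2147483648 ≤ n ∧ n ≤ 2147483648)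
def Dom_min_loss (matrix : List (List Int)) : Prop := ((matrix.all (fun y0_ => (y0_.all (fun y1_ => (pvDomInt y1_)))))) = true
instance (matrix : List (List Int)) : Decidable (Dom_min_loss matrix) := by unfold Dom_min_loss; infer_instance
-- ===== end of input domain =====

-- B replaces A's binary heap (heapq) and helper functions by a plain worklist scanned for
-- its minimum each round, with the successor moves built as one comprehension list;
-- objective: alternative (different queue data structure and decomposition; not faster).

-- ===== PORT A =====

-- heap tuple (heat_loss, coords, direction, steps) and visited key (coords, direction, steps)
abbrev pvT := Int × (Int × Int) × (Int × Int) × Int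
abbrev pvSt := (Int × Int) × (Int × Int) × Int

-- Python tuple '<' on (Int,(Int,Int),(Int,Int),Int): lexicographic
def pvLt (a b : pvT) : Bool :=
  if a.1 < b.1 then true else if b.1 < a.1 then false else
  if a.2.1.1 < b.2.1.1 then true else if b.2.1.1 < a.2.1.1 then false else
  if a.2.1.2 < b.2.1.2 then true else if b.2.1.2 < a.2.1.2 then false else
  if a.2.2.1.1 < b.2.2.1.1 then true else if b.2.2.1.1 < a.2.2.1.1 then false else
  if a.2.2.1.2 < b.2.2.1.2 then true else if b.2.2.1.2 < a.2.2.1.2 then false else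
  decide (a.2.2.2 < b.2.2.2)

-- heapq heappush/heappop ported by their priority-queue contract: a list kept sorted by
-- the Python tuple order; heappop = take the head (the minimum)
def pvHeapPush : List pvT → pvT → List pvT
  | [], x => [x]
  | y :: ys, x => if pvLt x y then x :: y :: ys else y :: pvHeapPush ys x

-- matrix[r][c], total form (Python raises only outside Pre_)
def pvCell (matrix : List (List Int)) (r c : Int) : Int :=
  (PySem.List.pyGet? ((PySem.List.pyGet? matrix r).getD []) c).getD 0

def pvIsInside (coords : Int × Int) (matrix : List (List Int)) : Bool :=
  decide (0 ≤ coords.1 ∧ coords.1 < (matrix.length : Int) ∧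
          0 ≤ coords.2 ∧ coords.2 < ((matrix.headD []).length : Int))

def pvAddOnQueue (matrix : List (List Int)) (q : List pvT) (heat : Int)
    (coords dir : Int × Int) (steps : Int) : List pvT :=
  let nr := coords.1 + dir.1
  let nc := coords.2 + dir.2
  if pvIsInside (nr, nc) matrix then
    pvHeapPush q (heat + pvCell matrix nr nc, (nr, nc), dir, steps)
  else q

def pvDirs : List (Int × Int) := [(1, 0), (0, 1), (-1, 0), (0, -1)]

-- the while-loop; the fuel argument is only a totalization guard (both ports get the same
-- fuel, which exceeds the number of heap pops the search can perform)
def pvLoopA (matrix : List (List Int)) (target : Int × Int) :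
    Nat → List pvT → PySem.Set pvSt → Int → Int
  | 0, _, _, h => h
  | _ + 1, [], _, h => h
  | f + 1, (hl, c, d, s) :: rest, vis, _ =>
    if c = target then hl
    else if PySem.Set.contains vis (c, d, s) then pvLoopA matrix target f rest vis hl
    else
      let vis' := PySem.Set.add vis (c, d, s)
      let q1 := if d ≠ (0, 0) ∧ s < 3 then pvAddOnQueue matrix rest hl c d (s + 1) else rest
      let q2 := pvDirs.foldl
        (fun q nd => if nd ≠ d ∧ nd ≠ (-d.1, -d.2) then pvAddOnQueue matrix q hl c nd 1 else q) q1
      pvLoopA matrix target f q2 vis' hl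

def pvFuel (matrix : List (List Int)) : Nat :=
  70 * (matrix.length * (matrix.headD []).length + 2) + 10

def min_loss (matrix : List (List Int)) : Int :=
  pvLoopA matrix ((matrix.length : Int) - 1, ((matrix.headD []).length : Int) - 1)
    (pvFuel matrix) [(0, (0, 0), (0, 0), 0)] PySem.Set.empty 0

-- ===== PORT B =====

-- min(pending): one scan for the minimal element under the tuple order
def pvScanMin (x : pvT) (xs : List pvT) : pvT :=
  xs.foldl (fun m y => if pvLt y m then y else m) x

def pvInsideRC (rows cols r c : Int) : Bool :=
  decide (0 ≤ r ∧ r < rows ∧ 0 ≤ c ∧ c < cols)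

-- the comprehension-built move list: turns first, then the straight continuation
def pvMoves (d : Int × Int) (s : Int) : List ((Int × Int) × Int) :=
  (pvDirs.filter (fun nd => decide (nd ≠ d ∧ nd ≠ (-d.1, -d.2)))).map (fun nd => (nd, (1 : Int)))
    ++ (if d ≠ (0, 0) ∧ s < 3 then [(d, s + 1)] else [])

def pvLoopB (matrix : List (List Int)) (rows cols : Int) :
    Nat → List pvT → PySem.Set pvSt → Int → Int
  | 0, _, _, h => h
  | _ + 1, [], _, h => h
  | f + 1, x :: xs, seen, _ =>
    let m := pvScanMin x xs
    let pending := (x :: xs).erase m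
    if m.2.1 = (rows - 1, cols - 1) then m.1
    else if PySem.Set.contains seen (m.2.1, m.2.2.1, m.2.2.2) then
      pvLoopB matrix rows cols f pending seen m.1
    else
      let seen' := PySem.Set.add seen (m.2.1, m.2.2.1, m.2.2.2)
      let pending' := (pvMoves m.2.2.1 m.2.2.2).foldl
        (fun q ds =>
          if pvInsideRC rows cols (m.2.1.1 + ds.1.1) (m.2.1.2 + ds.1.2) then
            q ++ [(m.1 + pvCell matrix (m.2.1.1 + ds.1.1) (m.2.1.2 + ds.1.2),
                   (m.2.1.1 + ds.1.1, m.2.1.2 + ds.1.2), ds.1, ds.2)]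
          else q) pending
      pvLoopB matrix rows cols f pending' seen' m.1

def min_loss_alt (matrix : List (List Int)) : Int :=
  pvLoopB matrix (matrix.length : Int) ((matrix.headD []).length : Int)
    (pvFuel matrix) [(0, (0, 0), (0, 0), 0)] PySem.Set.empty 0

-- ===== PRECONDITION & SPEC =====
-- Pre_ excludes the empty matrix (A raises IndexError on matrix[0]) and ragged matrices
-- with some row shorter than the first row, on which A can raise IndexError when the
-- search steps onto a missing cell.
def Pre_min_loss (matrix : List (List Int)) : Prop :=
  matrix ≠ [] ∧ ∀ row ∈ matrix, (matrix.headD []).length ≤ row.length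

instance (matrix : List (List Int)) : Decidable (Pre_min_loss matrix) := by
  unfold Pre_min_loss; infer_instance

def pvWitness_min_loss : List (List Int) := [[1, 2], [3, 4]]

def Spec_min_loss (matrix : List (List Int)) (out : Int) : Prop := out = min_loss_alt matrix
instance (matrix : List (List Int)) (out : Int) : Decidable (Spec_min_loss matrix out) := by
  unfold Spec_min_loss; infer_instance

-- ===== CLAIM (what is proved, stated in full; the proofs are below) =====
def Claim_equal_min_loss : Prop :=
  ∀ (matrix : List (List Int)), Dom_min_loss matrix → Pre_min_loss matrix →
    Spec_min_loss matrix (min_loss matrix)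

-- ===== LEMMAS AND PROOFS =====

lemma pvLt_iff (a b : pvT) : pvLt a b = true ↔
    (a.1 < b.1 ∨ (a.1 = b.1 ∧ (a.2.1.1 < b.2.1.1 ∨ (a.2.1.1 = b.2.1.1 ∧
     (a.2.1.2 < b.2.1.2 ∨ (a.2.1.2 = b.2.1.2 ∧ (a.2.2.1.1 < b.2.2.1.1 ∨ (a.2.2.1.1 = b.2.2.1.1 ∧
     (a.2.2.1.2 < b.2.2.1.2 ∨ (a.2.2.1.2 = b.2.2.1.2 ∧ a.2.2.2 < b.2.2.2)))))))))) := by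
  simp only [pvLt]
  split_ifs <;> simp <;> omega

lemma pvLt_irrefl (a : pvT) : pvLt a a = false := by
  rw [Bool.eq_false_iff, ne_eq, pvLt_iff]; omega

lemma pvLt_asymm {a b : pvT} (h : pvLt a b = true) : pvLt b a = false := by
  rw [pvLt_iff] at h; rw [Bool.eq_false_iff, ne_eq, pvLt_iff]; omega

lemma pvLt_trans {a b c : pvT} (h1 : pvLt a b = true) (h2 : pvLt b c = true) :
    pvLt a c = true := by
  rw [pvLt_iff] at *; omega

lemma pvLt_nlt_lt {a b c : pvT} (h1 : pvLt b a = false) (h2 : pvLt b c = true) :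
    pvLt a c = true := by
  rw [Bool.eq_false_iff, ne_eq, pvLt_iff] at h1; rw [pvLt_iff] at h2 ⊢; omega

lemma pvLt_antisymm {a b : pvT} (h1 : pvLt a b = false) (h2 : pvLt b a = false) : a = b := by
  rw [Bool.eq_false_iff, ne_eq, pvLt_iff] at h1 h2
  obtain ⟨a1, ⟨a2, a3⟩, ⟨a4, a5⟩, a6⟩ := a
  obtain ⟨b1, ⟨b2, b3⟩, ⟨b4, b5⟩, b6⟩ := b
  simp_all [Prod.ext_iff]; omega

def pvSorted (l : List pvT) : Prop := l.Pairwise (fun a b => pvLt b a = false)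

lemma pvHeapPush_perm (q : List pvT) (x : pvT) : (pvHeapPush q x).Perm (x :: q) := by
  induction q with
  | nil => simp [pvHeapPush]
  | cons y ys ih =>
    simp only [pvHeapPush]
    split_ifs
    · exact List.Perm.refl _
    · exact (List.Perm.cons y ih).trans (List.Perm.swap x y ys)

lemma pvHeapPush_sorted {q : List pvT} (hs : pvSorted q) (x : pvT) :
    pvSorted (pvHeapPush q x) := by
  induction q with
  | nil => simp [pvHeapPush, pvSorted]
  | cons y ys ih =>
    rw [pvSorted, List.pairwise_cons] at hs
    obtain ⟨hy, hys⟩ := hs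
    simp only [pvHeapPush]
    split_ifs with hxy
    · rw [pvSorted, List.pairwise_cons]
      refine ⟨?_, ?_⟩
      · intro z hz
        rcases List.mem_cons.mp hz with rfl | hz
        · exact pvLt_asymm hxy
        · cases hzx : pvLt z x with
          | true => exact absurd (pvLt_trans hzx hxy) (by simp [hy z hz])
          | false => rfl
      · exact List.pairwise_cons.mpr ⟨hy, hys⟩
    · rw [pvSorted, List.pairwise_cons]
      refine ⟨?_, ih hys⟩
      intro z hz
      have := (pvHeapPush_perm ys x).mem_iff.mp hz
      rcases List.mem_cons.mp this with rfl | hz'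
      · simpa using hxy
      · exact hy z hz'

lemma pvScanMin_cons (x y : pvT) (ys : List pvT) :
    pvScanMin x (y :: ys) = pvScanMin (if pvLt y x then y else x) ys := rfl

lemma pvScanMin_spec (x : pvT) (xs : List pvT) :
    pvScanMin x xs ∈ x :: xs ∧ ∀ z ∈ x :: xs, pvLt z (pvScanMin x xs) = false := by
  induction xs generalizing x with
  | nil =>
    refine ⟨by simp [pvScanMin], ?_⟩
    intro z hz; simp at hz; subst hz; exact pvLt_irrefl z
  | cons y ys ih =>
    rw [pvScanMin_cons]
    obtain ⟨ihm, ihmin⟩ := ih (if pvLt y x then y else x)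
    constructor
    · rcases List.mem_cons.mp ihm with h | h
      · rw [h]; split_ifs <;> simp
      · simp [h]
    · intro z hz
      rcases List.mem_cons.mp hz with rfl | hz'
      · by_cases hyx : pvLt y z = true
        · rw [if_pos hyx] at ihmin ⊢
          cases hc : pvLt z (pvScanMin y ys) with
          | false => rfl
          | true =>
            have := pvLt_trans hyx hc
            have h2 := ihmin y (by simp)
            rw [this] at h2; exact h2
        · rw [if_neg hyx] at ihmin ⊢
          exact ihmin z (by simp)
      · rcases List.mem_cons.mp hz' with rfl | hz''
        · by_cases hyx : pvLt z x = true
          · rw [if_pos hyx] at ihmin ⊢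
            exact ihmin z (by simp)
          · rw [if_neg hyx] at ihmin ⊢
            cases hc : pvLt z (pvScanMin x ys) with
            | false => rfl
            | true =>
              have := pvLt_nlt_lt (Bool.eq_false_iff.mpr hyx) hc
              have h2 := ihmin x (by simp)
              rw [this] at h2; exact h2
        · split_ifs at ihmin ⊢ <;> exact ihmin z (by simp [hz''])

-- the tuple one push adds (shared vocabulary of the two expansion descriptions)
def pvItem (matrix : List (List Int)) (hl : Int) (c : Int × Int)
    (ds : (Int × Int) × Int) : pvT :=
  (hl + pvCell matrix (c.1 + ds.1.1) (c.2 + ds.1.2),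
   (c.1 + ds.1.1, c.2 + ds.1.2), ds.1, ds.2)

def pvStraight (matrix : List (List Int)) (hl : Int) (c d : Int × Int) (s : Int) : List pvT :=
  if d ≠ (0, 0) ∧ s < 3 then
    (if pvIsInside (c.1 + d.1, c.2 + d.2) matrix then [pvItem matrix hl c (d, s + 1)] else [])
  else []

def pvTurns (matrix : List (List Int)) (hl : Int) (c d : Int × Int) : List pvT :=
  (((pvDirs.filter (fun nd => decide (nd ≠ d ∧ nd ≠ (-d.1, -d.2)))).filter
      (fun nd => pvIsInside (c.1 + nd.1, c.2 + nd.2) matrix)).map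
    (fun nd => pvItem matrix hl c (nd, 1)))

lemma pvAddOnQueue_eq (matrix : List (List Int)) (q : List pvT) (hl : Int)
    (c d : Int × Int) (st : Int) :
    pvAddOnQueue matrix q hl c d st =
      if pvIsInside (c.1 + d.1, c.2 + d.2) matrix then
        pvHeapPush q (pvItem matrix hl c (d, st)) else q := rfl

lemma pvStraight_perm (matrix : List (List Int)) (q : List pvT) (hl : Int)
    (c d : Int × Int) (s : Int) :
    (if d ≠ (0, 0) ∧ s < 3 then pvAddOnQueue matrix q hl c d (s + 1) else q).Perm
      (q ++ pvStraight matrix hl c d s) := by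
  rw [pvStraight, pvAddOnQueue_eq]
  by_cases h1 : d ≠ (0, 0) ∧ s < 3
  · rw [if_pos h1, if_pos h1]
    by_cases h2 : pvIsInside (c.1 + d.1, c.2 + d.2) matrix = true
    · rw [if_pos h2, if_pos h2]
      exact (pvHeapPush_perm q _).trans (List.perm_append_singleton _ _).symm
    · rw [if_neg h2, if_neg h2]; simp
  · rw [if_neg h1, if_neg h1]; simp

lemma pvStraight_sorted {q : List pvT} (hs : pvSorted q) (matrix : List (List Int)) (hl : Int)
    (c d : Int × Int) (s : Int) :
    pvSorted (if d ≠ (0, 0) ∧ s < 3 then pvAddOnQueue matrix q hl c d (s + 1) else q) := by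
  rw [pvAddOnQueue_eq]
  split_ifs <;> first | exact pvHeapPush_sorted hs _ | exact hs

lemma pvTurns_perm (matrix : List (List Int)) (hl : Int) (c d : Int × Int) :
    ∀ (l : List (Int × Int)) (q : List pvT),
    (l.foldl (fun q nd =>
        if nd ≠ d ∧ nd ≠ (-d.1, -d.2) then pvAddOnQueue matrix q hl c nd 1 else q) q).Perm
      (q ++ ((l.filter (fun nd => decide (nd ≠ d ∧ nd ≠ (-d.1, -d.2)))).filter
          (fun nd => pvIsInside (c.1 + nd.1, c.2 + nd.2) matrix)).map
        (fun nd => pvItem matrix hl c (nd, 1))) := by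
  intro l
  induction l with
  | nil => intro q; simp
  | cons a l ih =>
    intro q
    simp only [List.foldl_cons]
    by_cases h1 : a ≠ d ∧ a ≠ (-d.1, -d.2)
    · rw [if_pos h1, pvAddOnQueue_eq]
      by_cases h2 : pvIsInside (c.1 + a.1, c.2 + a.2) matrix = true
      · rw [if_pos h2]
        have e : (((a :: l).filter (fun nd => decide (nd ≠ d ∧ nd ≠ (-d.1, -d.2)))).filter
              (fun nd => pvIsInside (c.1 + nd.1, c.2 + nd.2) matrix))
            = a :: ((l.filter (fun nd => decide (nd ≠ d ∧ nd ≠ (-d.1, -d.2)))).filter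
              (fun nd => pvIsInside (c.1 + nd.1, c.2 + nd.2) matrix)) := by
          rw [List.filter_cons, if_pos (by simpa using h1), List.filter_cons, if_pos h2]
        rw [e, List.map_cons]
        refine (ih _).trans ?_
        refine ((pvHeapPush_perm q _).append_right _).trans ?_
        exact List.perm_middle.symm
      · rw [if_neg h2]
        have e : (((a :: l).filter (fun nd => decide (nd ≠ d ∧ nd ≠ (-d.1, -d.2)))).filter
              (fun nd => pvIsInside (c.1 + nd.1, c.2 + nd.2) matrix))
            = ((l.filter (fun nd => decide (nd ≠ d ∧ nd ≠ (-d.1, -d.2)))).filter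
              (fun nd => pvIsInside (c.1 + nd.1, c.2 + nd.2) matrix)) := by
          rw [List.filter_cons, if_pos (by simpa using h1), List.filter_cons, if_neg h2]
        rw [e]
        exact ih q
    · rw [if_neg h1]
      have e : ((a :: l).filter (fun nd => decide (nd ≠ d ∧ nd ≠ (-d.1, -d.2))))
          = (l.filter (fun nd => decide (nd ≠ d ∧ nd ≠ (-d.1, -d.2)))) := by
        rw [List.filter_cons, if_neg (by simpa using h1)]
      rw [e]
      exact ih q

lemma pvTurns_sorted (matrix : List (List Int)) (hl : Int) (c d : Int × Int) :
    ∀ (l : List (Int × Int)) (q : List pvT), pvSorted q →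
    pvSorted (l.foldl (fun q nd =>
        if nd ≠ d ∧ nd ≠ (-d.1, -d.2) then pvAddOnQueue matrix q hl c nd 1 else q) q) := by
  intro l
  induction l with
  | nil => intro q hq; simpa using hq
  | cons a l ih =>
    intro q hq
    simp only [List.foldl_cons]
    apply ih
    rw [pvAddOnQueue_eq]
    split_ifs <;> first | exact pvHeapPush_sorted hq _ | exact hq

lemma pvInside_eq (matrix : List (List Int)) (r c : Int) :
    pvInsideRC (matrix.length : Int) ((matrix.headD []).length : Int) r c =
      pvIsInside (r, c) matrix := rfl

-- B's fold over the move list, rewritten as an append of the filtered, mapped move list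
lemma pvPendB_eq (matrix : List (List Int)) (hl : Int) (c d : Int × Int) (s : Int)
    (pending : List pvT) :
    ((pvMoves d s).foldl (fun q ds =>
        if pvInsideRC (matrix.length : Int) ((matrix.headD []).length : Int)
            (c.1 + ds.1.1) (c.2 + ds.1.2) then
          q ++ [(hl + pvCell matrix (c.1 + ds.1.1) (c.2 + ds.1.2),
                 (c.1 + ds.1.1, c.2 + ds.1.2), ds.1, ds.2)]
        else q) pending)
      = pending ++ (pvTurns matrix hl c d ++ pvStraight matrix hl c d s) := by
  have h := PySem.List.foldl_append_if
    (l := pvMoves d s)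
    (p := fun ds => pvInsideRC (matrix.length : Int) ((matrix.headD []).length : Int)
      (c.1 + ds.1.1) (c.2 + ds.1.2))
    (f := fun ds => pvItem matrix hl c ds) (acc := pending)
  simp only [pvItem] at h
  rw [h, pvMoves, List.filter_append, List.map_append]
  congr 1
  congr 1
  · -- turns part
    rw [List.filter_map, List.map_map]
    rfl
  · -- straight part
    rw [pvStraight]
    by_cases hc : d ≠ (0, 0) ∧ s < 3
    · rw [if_pos hc, if_pos hc]
      simp only [List.filter_cons, List.filter_nil, pvInside_eq]
      split_ifs <;> simp [pvItem]
    · rw [if_neg hc, if_neg hc]; simp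

-- the main lockstep lemma: sorted queue on the A side, any permutation of it on the B side
lemma pvLoop_eq (matrix : List (List Int)) :
    ∀ (f : Nat) (qA qB : List pvT) (vis : PySem.Set pvSt) (h : Int),
    pvSorted qA → qA.Perm qB →
    pvLoopA matrix ((matrix.length : Int) - 1, ((matrix.headD []).length : Int) - 1)
        f qA vis h
      = pvLoopB matrix (matrix.length : Int) ((matrix.headD []).length : Int) f qB vis h := by
  intro f
  induction f with
  | zero => intro qA qB vis h _ _; rfl
  | succ f ih =>
    intro qA qB vis h hs hperm
    match qA, hperm with
    | [], hperm =>
      have : qB = [] := hperm.symm.eq_nil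
      subst this; rfl
    | (hl, c, d, s) :: rest, hperm =>
      match qB, hperm with
      | [], hperm => exact absurd hperm.eq_nil (by simp)
      | y :: ys, hperm =>
        -- the scanned minimum of qB is the head of the sorted qA
        have hrest : ∀ z ∈ rest, pvLt z (hl, c, d, s) = false :=
          (List.pairwise_cons.mp hs).1
        obtain ⟨hMmem, hMmin⟩ := pvScanMin_spec y ys
        have hxM : pvLt (hl, c, d, s) (pvScanMin y ys) = false :=
          hMmin _ (hperm.mem_iff.mp (by simp))
        have hMx : pvLt (pvScanMin y ys) (hl, c, d, s) = false := by
          rcases List.mem_cons.mp (hperm.symm.mem_iff.mp hMmem) with h' | h'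
          · rw [h']; exact pvLt_irrefl _
          · exact hrest _ h'
        have hM : pvScanMin y ys = (hl, c, d, s) := pvLt_antisymm hMx hxM
        have hE : ((y :: ys).erase (hl, c, d, s)).Perm rest := by
          have := hperm.symm.erase (hl, c, d, s)
          simpa using this
        by_cases ht : c = ((matrix.length : Int) - 1, ((matrix.headD []).length : Int) - 1)
        · simp only [pvLoopA, pvLoopB, hM, if_pos ht]
        · by_cases hv : PySem.Set.contains vis (c, d, s) = true
          · simp only [pvLoopA, pvLoopB, hM, if_neg ht, if_pos hv]
            exact ih rest _ vis hl (List.pairwise_cons.mp hs).2 hE.symm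
          · simp only [pvLoopA, pvLoopB, hM, if_neg ht, if_neg hv]
            rw [pvPendB_eq]
            apply ih
            · exact pvTurns_sorted matrix hl c d pvDirs _
                (pvStraight_sorted (List.pairwise_cons.mp hs).2 matrix hl c d s)
            · refine (pvTurns_perm matrix hl c d pvDirs _).trans ?_
              rw [← pvTurns]
              refine ((pvStraight_perm matrix rest hl c d s).append_right _).trans ?_
              have e1 : (rest ++ pvStraight matrix hl c d s) ++ pvTurns matrix hl c d
                  = rest ++ (pvStraight matrix hl c d s ++ pvTurns matrix hl c d) := by
                rw [List.append_assoc]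
              rw [e1]
              refine (List.Perm.append_left rest List.perm_append_comm).trans ?_
              exact (hE.symm.append_right _)

-- ===== VERDICT (by name: the statement is the Claim_ definition above) =====
theorem min_loss_spec : Claim_equal_min_loss := by
  intro matrix _ _
  unfold Spec_min_loss min_loss min_loss_alt
  exact pvLoop_eq matrix (pvFuel matrix) _ _ PySem.Set.empty 0 (by simp [pvSorted]) (List.Perm.refl _)
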